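-- pv_equiv track=rewrite | github.com/kendallm/advent-of-code | 2024/day4.py | gen_paths
-- ===== SOURCE A (Python) =====
-- def gen_paths(node):
--     paths = ([node], [node], [node], [node], [node], [node], [node], [node])
--     x, y = node
--     for i in range(4):
--         i += 1
--         xl = x - i
--         xr = x + i
--         yu = y - i
--         yd = y + i
--         paths[0].append((xl, y))
--         paths[1].append((xr, y))
--         paths[2].append((x, yu))
--         paths[3].append((x, yd))
--
--         paths[4].append((xl, yu))
--         paths[5].append((xr, yu))
--         paths[6].append((xl, yd))
--         paths[7].append((xr, yd))
--
--     return paths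
-- ===== SOURCE B (Python) =====
-- def gen_paths(node):
--     def walk(p, dx, dy, n):
--         # recursively step from the current point; no index arithmetic
--         if n == 0:
--             return [p]
--         return [p] + walk((p[0] + dx, p[1] + dy), dx, dy, n - 1)
--
--     dirs = ((-1, 0), (1, 0), (0, -1), (0, 1),
--             (-1, -1), (1, -1), (-1, 1), (1, 1))
--     return tuple(walk(node, dx, dy, 4) for dx, dy in dirs)
-- ===== Notes on version B (the rewrite author's own statement) =====
-- stated objective: alternative
-- what changed: Instead of one loop over step index i that computes offsets x±i,y±i from the origin and appends to all 8 lists simultaneously, B builds each path by structural recursion that carries the current point and repeatedly adds a unit direction delta (no offset multiplication, no shared mutable tuple of lists).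
import Mathlib
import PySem

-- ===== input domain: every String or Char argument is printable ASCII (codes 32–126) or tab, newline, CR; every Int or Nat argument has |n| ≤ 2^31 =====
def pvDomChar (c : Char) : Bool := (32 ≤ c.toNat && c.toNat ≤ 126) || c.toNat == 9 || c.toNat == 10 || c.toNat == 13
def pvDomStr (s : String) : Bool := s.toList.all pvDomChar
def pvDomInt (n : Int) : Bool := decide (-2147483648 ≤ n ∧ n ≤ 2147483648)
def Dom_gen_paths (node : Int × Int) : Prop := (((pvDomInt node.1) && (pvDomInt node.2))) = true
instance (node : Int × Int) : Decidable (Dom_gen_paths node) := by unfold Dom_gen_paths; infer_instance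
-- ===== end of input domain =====

-- B builds each path by structural recursion carrying the current point and adding a unit delta each step, instead of A's single loop appending offset-from-origin points to all 8 lists (alternative decomposition, same cost).


-- ===== PORT A =====
def gen_paths (node : Int × Int) : (List (Int × Int)) × (List (Int × Int)) × (List (Int × Int)) × (List (Int × Int)) × (List (Int × Int)) × (List (Int × Int)) × (List (Int × Int)) × (List (Int × Int)) :=
  let x := node.1
  let y := node.2
  (PySem.List.pyRange 0 4 1).foldl (fun p i =>
    let i := i + 1
    let xl := x - i
    let xr := x + i
    let yu := y - i
    let yd := y + i
    (p.1 ++ [(xl, y)], p.2.1 ++ [(xr, y)], p.2.2.1 ++ [(x, yu)], p.2.2.2.1 ++ [(x, yd)],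
     p.2.2.2.2.1 ++ [(xl, yu)], p.2.2.2.2.2.1 ++ [(xr, yu)],
     p.2.2.2.2.2.2.1 ++ [(xl, yd)], p.2.2.2.2.2.2.2 ++ [(xr, yd)]))
    ([node], [node], [node], [node], [node], [node], [node], [node])

-- ===== PORT B =====
-- walk p dx dy n = [p] ++ walk (p+δ) dx dy (n-1): recursion carrying the current point
def pvWalk (p : Int × Int) (dx dy : Int) (n : Nat) : List (Int × Int) :=
  match n with
  | 0 => [p]
  | Nat.succ m => [p] ++ pvWalk (p.1 + dx, p.2 + dy) dx dy m

def gen_paths_alt (node : Int × Int) : (List (Int × Int)) × (List (Int × Int)) × (List (Int × Int)) × (List (Int × Int)) × (List (Int × Int)) × (List (Int × Int)) × (List (Int × Int)) × (List (Int × Int)) :=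
  (pvWalk node (-1) 0 4, pvWalk node 1 0 4, pvWalk node 0 (-1) 4, pvWalk node 0 1 4,
   pvWalk node (-1) (-1) 4, pvWalk node 1 (-1) 4, pvWalk node (-1) 1 4, pvWalk node 1 1 4)

-- ===== PRECONDITION & SPEC =====
def Spec_gen_paths (node : Int × Int) (out : (List (Int × Int)) × (List (Int × Int)) × (List (Int × Int)) × (List (Int × Int)) × (List (Int × Int)) × (List (Int × Int)) × (List (Int × Int)) × (List (Int × Int))) : Prop := out = gen_paths_alt node
instance (node : Int × Int) (out : (List (Int × Int)) × (List (Int × Int)) × (List (Int × Int)) × (List (Int × Int)) × (List (Int × Int)) × (List (Int × Int)) × (List (Int × Int)) × (List (Int × Int))) : Decidable (Spec_gen_paths node out) := by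
  unfold Spec_gen_paths
  have h : DecidableEq (List (Int × Int)) := inferInstance
  exact @instDecidableEqProd _ _ h (@instDecidableEqProd _ _ h (@instDecidableEqProd _ _ h (@instDecidableEqProd _ _ h (@instDecidableEqProd _ _ h (@instDecidableEqProd _ _ h (@instDecidableEqProd _ _ h h)))))) out (gen_paths_alt node)

-- ===== CLAIM (what is proved, stated in full; the proofs are below) =====
def Claim_equal_gen_paths : Prop := ∀ (node : Int × Int), Dom_gen_paths node → Spec_gen_paths node (gen_paths node)

-- ===== LEMMAS AND PROOFS =====

-- ===== VERDICT (by name: the statement is the Claim_ definition above) =====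
theorem gen_paths_spec : Claim_equal_gen_paths := by
  intro node _
  unfold Spec_gen_paths gen_paths gen_paths_alt pvWalk
  simp [pvWalk, PySem.List.pyRange, List.range_succ, Prod.ext_iff]
  omega
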